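-- pv_equiv track=rewrite | github.com/GaPanda/oddsparser | core/match.py | formating_teams
-- ===== SOURCE A (Python) =====
-- def formating_teams(teams):
--     #ПЕРЕПИСАТЬ ИСПОЛЬЗУЯ РЕГУЛЯРКИ
--     #!!!!!!!!!!!!!!!!!!!!!!!!!!!!!!
--     match_teams = []
--     team_a = []
--     team_b = []
--     i = 0
--     position = 0 #Индекс тире в строке
--     for key in teams:
--         if position == 0 and teams[i] != '-':
--             team_a.append(teams[i])
--         elif teams[i] == '-':
--             position = i
--         elif position != 0:
--             team_b.append(teams[i])
--         i += 1
--     teamA = ''.join(team_a)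
--     teamB = ''.join(team_b)
--     match_teams.append(teamA)
--     match_teams.append(teamB)
--     return match_teams
-- ===== SOURCE B (Python) =====
-- def formating_teams(teams):
--     def drop_dashes(s):
--         return ''.join(c for c in s if c != '-')
--     idx = teams.find('-', 1)
--     if idx == -1:
--         return [drop_dashes(teams), '']
--     return [drop_dashes(teams[:idx]), drop_dashes(teams[idx + 1:])]
-- ===== Notes on version B (the rewrite author's own statement) =====
-- stated objective: simpler
-- what changed: Replaced A's char-by-char state machine (index/position accumulators building two char lists) by a direct find of the first dash at index >= 1 and two slices with dashes filtered out.
import Mathlib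
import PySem

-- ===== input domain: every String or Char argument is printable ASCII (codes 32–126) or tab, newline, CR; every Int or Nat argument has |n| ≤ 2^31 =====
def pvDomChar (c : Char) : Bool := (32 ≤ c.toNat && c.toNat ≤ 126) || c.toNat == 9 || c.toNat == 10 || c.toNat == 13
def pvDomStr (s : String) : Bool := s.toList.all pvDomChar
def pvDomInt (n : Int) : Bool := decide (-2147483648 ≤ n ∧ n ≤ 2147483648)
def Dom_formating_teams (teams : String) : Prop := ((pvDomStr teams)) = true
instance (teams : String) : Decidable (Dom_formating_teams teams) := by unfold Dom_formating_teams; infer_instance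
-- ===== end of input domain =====

-- B replaces A's indexed state machine by find-first-dash-at-index≥1 plus two slices (simpler decomposition); equal return value everywhere.

-- ===== PORT A =====
-- one loop step of A: state (team_a, team_b, position), input (i, teams[i])
def pvStepA (st : List Char × List Char × Int) (p : Int × Char) : List Char × List Char × Int :=
  if st.2.2 = 0 ∧ p.2 ≠ '-' then (st.1 ++ [p.2], st.2.1, st.2.2)
  else if p.2 = '-' then (st.1, st.2.1, p.1)
  else if st.2.2 ≠ 0 then (st.1, st.2.1 ++ [p.2], st.2.2)
  else st

def formating_teams (teams : String) : List String :=
  let r := (PySem.List.enumerate teams.toList 0).foldl pvStepA ([], [], 0)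
  [String.mk r.1, String.mk r.2.1]

-- ===== PORT B =====
-- ''.join(c for c in s if c != '-')
def pvDropDashes (s : List Char) : String := String.mk (s.filter (fun c => c ≠ '-'))

def formating_teams_alt (teams : String) : List String :=
  let idx := PySem.Str.findFrom teams "-" 1 none
  if idx = -1 then [pvDropDashes teams.toList, ""]
  else [pvDropDashes (PySem.Str.slice teams none (some idx)).toList,
        pvDropDashes (PySem.Str.slice teams (some (idx + 1)) none).toList]

-- ===== PRECONDITION & SPEC =====
def Spec_formating_teams (teams : String) (out : List String) : Prop := out = formating_teams_alt teams
instance (teams : String) (out : List String) : Decidable (Spec_formating_teams teams out) := by unfold Spec_formating_teams; infer_instance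

-- ===== CLAIM (what is proved, stated in full; the proofs are below) =====
def Claim_equal_formating_teams : Prop := ∀ (teams : String), Dom_formating_teams teams → Spec_formating_teams teams (formating_teams teams)

-- ===== LEMMAS AND PROOFS =====

-- phase 2 of A's loop: a dash has been seen at a nonzero index; every non-dash char goes to team_b
theorem pvFold_phase2 (l : List Char) (ta tb : List Char) (pos : Int) (s : Nat)
    (hp : pos ≠ 0) (hs : 1 ≤ s) :
    ∃ p, (PySem.List.enumerate l (s : Int)).foldl pvStepA (ta, tb, pos)
      = (ta, tb ++ l.filter (fun c => c ≠ '-'), p) := by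
  induction l generalizing tb pos s with
  | nil => exact ⟨pos, by simp [PySem.List.enumerate]⟩
  | cons c l ih =>
    rw [PySem.List.enumerate_cons, List.foldl_cons]
    by_cases hc : c = '-'
    · subst hc
      have : pvStepA (ta, tb, pos) ((s : Int), '-') = (ta, tb, (s : Int)) := by
        simp [pvStepA, hp]
      rw [this]
      have := ih tb (s : Int) (s + 1) (by positivity) (by omega)
      simpa using this
    · have hst : pvStepA (ta, tb, pos) ((s : Int), c) = (ta, tb ++ [c], pos) := by
        simp [pvStepA, hp, hc]
      rw [hst]
      obtain ⟨p, hp'⟩ := ih (tb ++ [c]) pos (s + 1) hp (by omega)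
      refine ⟨p, ?_⟩
      rw [show (((s+1:Nat)):Int) = (s:Int)+1 from by push_cast; ring] at hp'
      rw [hp']
      simp [hc]

-- phase 1 of A's loop (position = 0, indices ≥ 1): chars go to team_a until the first dash
theorem pvFold_phase1 (l : List Char) (ta : List Char) (s : Nat) (hs : 1 ≤ s) :
    ∃ p, (PySem.List.enumerate l (s : Int)).foldl pvStepA (ta, [], 0)
      = (ta ++ l.takeWhile (fun c => c ≠ '-'),
         ((l.dropWhile (fun c => c ≠ '-')).drop 1).filter (fun c => c ≠ '-'), p) := by
  induction l generalizing ta s with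
  | nil => exact ⟨0, by simp [PySem.List.enumerate]⟩
  | cons c l ih =>
    rw [PySem.List.enumerate_cons, List.foldl_cons]
    by_cases hc : c = '-'
    · subst hc
      have hst : pvStepA (ta, [], 0) ((s : Int), '-') = (ta, [], (s : Int)) := by
        simp [pvStepA]
      rw [hst]
      obtain ⟨p, hp⟩ := pvFold_phase2 l ta [] (s : Int) (s + 1) (by omega) (by omega)
      refine ⟨p, ?_⟩
      rw [show (((s+1:Nat)):Int) = (s:Int)+1 from by push_cast; ring] at hp
      rw [hp]
      simp
    · have hst : pvStepA (ta, [], 0) ((s : Int), c) = (ta ++ [c], [], 0) := by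
        simp [pvStepA, hc]
      rw [hst]
      obtain ⟨p, hp⟩ := ih (ta ++ [c]) (s + 1) (by omega)
      refine ⟨p, ?_⟩
      rw [show (((s+1:Nat)):Int) = (s:Int)+1 from by push_cast; ring] at hp
      rw [hp]
      simp [hc]

-- [a] is a prefix of l iff l's head is a
theorem pvSingleton_prefix {a : Char} {l : List Char} : [a] <+: l ↔ l[0]? = some a := by
  constructor
  · rintro ⟨t, rfl⟩; simp
  · intro h
    cases l with
    | nil => simp at h
    | cons x xs => simp at h; exact ⟨xs, by simp [h]⟩

-- if the first dash of l is at index j, takeWhile/dropWhile split l at j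
theorem pvSplit_at_first (l : List Char) (j : Nat)
    (hj : l[j]? = some '-') (hmin : ∀ i, i < j → l[i]? ≠ some '-') :
    l.takeWhile (fun c => c ≠ '-') = l.take j ∧ l.dropWhile (fun c => c ≠ '-') = l.drop j := by
  induction l generalizing j with
  | nil => simp at hj
  | cons c l ih =>
    cases j with
    | zero =>
      simp at hj
      subst hj
      simp [List.takeWhile, List.dropWhile]
    | succ k =>
      have hc : c ≠ '-' := by
        intro h; exact hmin 0 (by omega) (by simp [h])
      have := ih k (by simpa using hj) (fun i hi => by
        have := hmin (i + 1) (by omega); simpa using this)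
      refine ⟨?_, ?_⟩
      · rw [List.takeWhile_cons_of_pos (by simp [hc]), List.take_succ_cons, this.1]
      · rw [List.dropWhile_cons_of_pos (by simp [hc]), List.drop_succ_cons, this.2]

theorem pvNoDash_take (l : List Char) (j : Nat) (hmin : ∀ i, i < j → l[i]? ≠ some '-') :
    (l.take j).filter (fun c => c ≠ '-') = l.take j := by
  rw [List.filter_eq_self]
  intro a ha
  obtain ⟨i, hi, hgt⟩ := List.getElem_of_mem ha
  have hil : i < j := by simp at hi; omega
  have hll : i < l.length := by simp at hi; omega
  have h1 : l[i] ≠ '-' := by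
    intro h
    exact hmin i hil (by rw [List.getElem?_eq_getElem hll, h])
  have : a = l[i] := by rw [← hgt, List.getElem_take]
  simpa [this] using h1

theorem pvMk_nil : String.mk ([] : List Char) = "" := rfl

-- [a] is an infix of l iff a is an element
theorem pvSingleton_infix {a : Char} {l : List Char} : [a] <:+: l ↔ a ∈ l := by
  constructor
  · intro h
    have := h.sublist
    simpa using this
  · intro h
    obtain ⟨s, t, rfl⟩ := List.append_of_mem h
    exact ⟨s, t, by simp⟩

-- the whole equivalence, stated on the character list
theorem pvMain (cs : List Char) :
    ([String.mk (((PySem.List.enumerate cs 0).foldl pvStepA ([], [], 0)).1),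
      String.mk (((PySem.List.enumerate cs 0).foldl pvStepA ([], [], 0)).2.1)] : List String)
    = (if PySem.Chars.findFrom cs ['-'] 1 none = -1 then
         [String.mk (cs.filter (fun c => c ≠ '-')), ""]
       else
         [String.mk ((PySem.List.slice cs none (some (PySem.Chars.findFrom cs ['-'] 1 none))).filter (fun c => c ≠ '-')),
          String.mk ((PySem.List.slice cs (some (PySem.Chars.findFrom cs ['-'] 1 none + 1)) none).filter (fun c => c ≠ '-'))]) := by
  cases cs with
  | nil => decide
  | cons c rest =>
    -- A's loop: first step (index 0), then phase 1 over the tail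
    have hta0 : pvStepA ([], [], 0) ((0 : Int), c)
        = ((if c = '-' then ([] : List Char) else [c]), [], 0) := by
      by_cases hc : c = '-' <;> simp [pvStepA, hc]
    obtain ⟨p, hp⟩ := pvFold_phase1 rest (if c = '-' then [] else [c]) 1 le_rfl
    have hA : (PySem.List.enumerate (c :: rest) 0).foldl pvStepA ([], [], 0)
        = ((if c = '-' then ([] : List Char) else [c]) ++ rest.takeWhile (fun x => x ≠ '-'),
           ((rest.dropWhile (fun x => x ≠ '-')).drop 1).filter (fun x => x ≠ '-'), p) := by
      rw [PySem.List.enumerate_cons, List.foldl_cons, hta0]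
      simpa using hp
    -- B's find
    have hfd : PySem.Chars.findFrom (c :: rest) ['-'] 1 none
        = if PySem.Chars.find rest ['-'] = -1 then -1 else 1 + PySem.Chars.find rest ['-'] := by
      have h := PySem.Chars.findFrom_natCast (c :: rest) ['-'] 1 (by simp)
      simpa using h
    by_cases hnf : PySem.Chars.find rest ['-'] = -1
    · -- no dash in the tail
      have hnd : '-' ∉ rest := by
        have := PySem.Chars.find_eq_neg_one_iff (s := rest) (sub := ['-']) |>.mp hnf
        exact fun hm => this (pvSingleton_infix.mpr hm)
      have htw : rest.takeWhile (fun x => x ≠ '-') = rest :=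
        List.takeWhile_eq_self_iff.mpr (fun a ha => by
          simp only [ne_eq, decide_eq_true_eq]; exact fun h => hnd (h ▸ ha))
      have hdw : rest.dropWhile (fun x => x ≠ '-') = [] :=
        List.dropWhile_eq_nil_iff.mpr (fun a ha => by
          simp only [ne_eq, decide_eq_true_eq]; exact fun h => hnd (h ▸ ha))
      have hfr : rest.filter (fun x => x ≠ '-') = rest :=
        List.filter_eq_self.mpr (fun a ha => by
          simp only [ne_eq, decide_eq_true_eq]; exact fun h => hnd (h ▸ ha))
      rw [hA, hfd, if_pos hnf, if_pos rfl]
      simp only [ne_eq, decide_not] at htw hdw hfr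
      by_cases hc : c = '-' <;> simp [hc, htw, hdw, hfr, pvMk_nil]
    · -- first dash of the tail at index jn
      have h0 : (0 : Int) ≤ PySem.Chars.find rest ['-'] := by
        have := PySem.Chars.neg_one_le_find (s := rest) (sub := ['-'])
        omega
      set j : Int := PySem.Chars.find rest ['-'] with hj
      set jn : Nat := j.toNat with hjn
      obtain ⟨hpre, hmin⟩ := PySem.Chars.find_spec (s := rest) (sub := ['-']) h0
      have hget : rest[jn]? = some '-' := by
        have := pvSingleton_prefix.mp hpre
        simpa using this
      have hmin' : ∀ i, i < jn → rest[i]? ≠ some '-' := by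
        intro i hi hcontra
        exact hmin i hi (pvSingleton_prefix.mpr (by simpa using hcontra))
      obtain ⟨htw, hdw⟩ := pvSplit_at_first rest jn hget hmin'
      have hnt := pvNoDash_take rest jn hmin'
      have hne : ¬ (if PySem.Chars.find rest ['-'] = -1 then (-1 : Int) else 1 + PySem.Chars.find rest ['-']) = -1 := by
        rw [if_neg hnf]; omega
      rw [hA, hfd, if_neg hne, if_neg hnf]
      have hsl1 : PySem.List.slice (c :: rest) none (some (1 + j)) = c :: rest.take jn := by
        rw [PySem.List.slice_to _ (by omega)]
        have : (1 + j).toNat = jn + 1 := by omega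
        rw [this, List.take_succ_cons]
      have hsl2 : PySem.List.slice (c :: rest) (some (1 + j + 1)) none = rest.drop (jn + 1) := by
        rw [PySem.List.slice_from _ (by omega)]
        have : (1 + j + 1).toNat = jn + 2 := by omega
        rw [this]
        simp [List.drop_succ_cons]
      rw [hsl1, hsl2, htw, hdw]
      have hdd : (rest.drop jn).drop 1 = rest.drop (jn + 1) := by
        rw [List.drop_drop]
      rw [hdd]
      simp only [ne_eq, decide_not] at hnt
      by_cases hc : c = '-' <;> simp [hc, hnt, pvMk_nil]

-- ===== VERDICT (by name: the statement is the Claim_ definition above) =====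
theorem formating_teams_spec : Claim_equal_formating_teams := by
  intro teams _
  show formating_teams teams = formating_teams_alt teams
  unfold formating_teams formating_teams_alt pvDropDashes
  simp only [PySem.Str.findFrom_eq, PySem.Str.toList_slice, PySem.Chars.slice_eq_listSlice]
  have hsub : ("-" : String).toList = ['-'] := rfl
  rw [hsub]
  have := pvMain teams.toList
  by_cases h : PySem.Chars.findFrom teams.toList ['-'] 1 none = -1 <;>
    simp only [h, if_pos, if_neg, if_true, if_false, reduceIte] at this ⊢ <;>
    exact this
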